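-- pv_equiv track=rewrite | github.com/RohithEngu/Opinion-Summarizer | code/Attributes.py | getCountEmoticons
-- ===== SOURCE A (Python) =====
-- def getCountEmoticons(tweet):
--     emoticons = [":-)",":-*",":-(",":-|"]
--     tokens = tweet.split()
--     count =0
--     for token in tokens:
--         if token in emoticons:
--             count+=1
--     return count
-- ===== SOURCE B (Python) =====
-- def getCountEmoticons(tweet):
--     # two-phase: build a frequency table of all tokens, then sum the four fixed emoticon keys
--     counts = {}
--     for token in tweet.split():
--         counts[token] = counts.get(token, 0) + 1
--     return (counts.get(":-)", 0) + counts.get(":-*", 0)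
--             + counts.get(":-(", 0) + counts.get(":-|", 0))
-- ===== Notes on version B (the rewrite author's own statement) =====
-- stated objective: alternative
-- what changed: B builds a frequency table of all tokens in one pass and then sums the counts of the four fixed emoticon keys, instead of testing each token for membership in the emoticon list.
import Mathlib
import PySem

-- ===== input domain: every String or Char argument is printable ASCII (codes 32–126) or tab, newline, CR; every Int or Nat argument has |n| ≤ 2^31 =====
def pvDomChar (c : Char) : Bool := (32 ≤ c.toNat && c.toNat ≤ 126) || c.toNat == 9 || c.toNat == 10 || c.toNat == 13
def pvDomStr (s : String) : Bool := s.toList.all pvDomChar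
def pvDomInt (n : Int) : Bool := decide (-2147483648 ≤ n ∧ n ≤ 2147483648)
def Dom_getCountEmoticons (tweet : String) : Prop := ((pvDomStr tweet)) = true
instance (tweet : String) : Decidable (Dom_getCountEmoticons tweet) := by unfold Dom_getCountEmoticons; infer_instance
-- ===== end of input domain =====

-- B builds a frequency table of all tokens once and sums the four fixed emoticon keys (alternative decomposition, same cost).


-- ===== PORT A =====
-- per-token loop: if token is in the fixed emoticon list, increment the counter
def getCountEmoticons (tweet : String) : Int :=
  let emoticons : List String := [":-)", ":-*", ":-(", ":-|"]
  let tokens := PySem.Str.split₀ tweet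
  tokens.foldl (fun count token => if emoticons.contains token then count + 1 else count) 0

-- ===== PORT B =====
-- phase 1: frequency table of all tokens; phase 2: sum the four fixed keys
def getCountEmoticons_alt (tweet : String) : Int :=
  let counts : PySem.Dict String Int :=
    (PySem.Str.split₀ tweet).foldl (fun d token => d.insert token (d.getD token 0 + 1)) PySem.Dict.empty
  counts.getD ":-)" 0 + counts.getD ":-*" 0 + counts.getD ":-(" 0 + counts.getD ":-|" 0

-- ===== PRECONDITION & SPEC =====
def Spec_getCountEmoticons (tweet : String) (out : Int) : Prop := out = getCountEmoticons_alt tweet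
instance (tweet : String) (out : Int) : Decidable (Spec_getCountEmoticons tweet out) := by unfold Spec_getCountEmoticons; infer_instance

-- ===== CLAIM (what is proved, stated in full; the proofs are below) =====
def Claim_equal_getCountEmoticons : Prop := ∀ (tweet : String), Dom_getCountEmoticons tweet → Spec_getCountEmoticons tweet (getCountEmoticons tweet)

-- ===== LEMMAS AND PROOFS =====
-- A's membership loop counts exactly the occurrences of the four (distinct) emoticons
theorem foldl_mem4 (l : List String) (c : Int) :
    l.foldl (fun count token => if ([":-)", ":-*", ":-(", ":-|"] : List String).contains token then count + 1 else count) c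
      = c + (l.count ":-)" : Int) + l.count ":-*" + l.count ":-(" + l.count ":-|" := by
  induction l generalizing c with
  | nil => simp
  | cons x xs ih =>
    simp only [List.foldl_cons, List.count_cons, ih]
    by_cases h1 : x = ":-)" <;> by_cases h2 : x = ":-*" <;> by_cases h3 : x = ":-(" <;> by_cases h4 : x = ":-|" <;>
      simp_all <;> ring

-- ===== VERDICT (by name: the statement is the Claim_ definition above) =====
theorem getCountEmoticons_spec : Claim_equal_getCountEmoticons := by
  intro tweet _
  unfold Spec_getCountEmoticons getCountEmoticons getCountEmoticons_alt
  simp only [foldl_mem4, PySem.Dict.getD_foldl_insert_add_one, PySem.Dict.getD_empty]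
  ring
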